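-- pv_equiv track=rewrite | github.com/v-novaltd/LCEVCdec | tools/shader_tools/metadata_validator.py | get_all_used_defines
-- ===== SOURCE A (Python) =====
-- def get_all_used_defines(shader_file):
--     used_defines = set()
--     for line in shader_file.splitlines():
--         line = line.lstrip()
--         if line.startswith("#") or len(line) == 0:
--             continue
--         identifiers = split_into_identifiers(line)
--         for ident in identifiers:
--             if has_no_lower_case(ident):
--                 used_defines.add(ident)
--     return used_defines
--
-- def split_into_identifiers(line):
--     # Identifiers are defined by unicode. Python's "isidentifier" function and C's compiler (and
--     # therefore GLSL's) both use the same unicode criteria. Luckily, all we really need to know is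
--     # that identifiers can simply be extracted "greedily" from left to right. In other words, to
--     # get the identifiers, ignore non-identifier chars until you hit an identifier char. Then,
--     # collect chars up until the cumulative string no longer meets the criteria for an identifier
--     identifiers = []
--     if len(line) == 0:
--         return identifiers
--
--     string_so_far = ""
--     for char in line:
--         candidate_identifier = string_so_far
--         if candidate_identifier.isidentifier():
--             candidate_identifier += char
--             if not candidate_identifier.isidentifier():
--                 candidate_identifier = candidate_identifier[:-1]
--                 identifiers.append(candidate_identifier)
--                 string_so_far = ""
--         else:
--             string_so_far = ""
--         string_so_far += char
--
--     if string_so_far.isidentifier():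
--         identifiers.append(string_so_far)
--
--     return identifiers
--
-- def has_no_lower_case(string):
--     for char in string:
--         if char.islower():
--             return False
--     return True
-- ===== SOURCE B (Python) =====
-- _KEEP = set("ABCDEFGHIJKLMNOPQRSTUVWXYZabcdefghijklmnopqrstuvwxyz0123456789_")
-- _TABLE = {i: " " for i in range(128) if chr(i) not in _KEEP}
--
--
-- def get_all_used_defines(shader_file):
--     # Staged bulk passes instead of a per-character state machine: blank out every
--     # non-identifier character at once (translate), let split() produce the maximal
--     # identifier-character runs, then strip each run's leading digits (an identifier
--     # cannot start with a digit) and keep the runs without lowercase letters.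
--     used_defines = set()
--     for raw_line in shader_file.splitlines():
--         line = raw_line.lstrip()
--         if not line or line[0] == "#":
--             continue
--         for run in line.translate(_TABLE).split():
--             ident = run.lstrip("0123456789")
--             if ident and ident == ident.upper():
--                 used_defines.add(ident)
--     return used_defines
-- ===== Notes on version B (the rewrite author's own statement) =====
-- stated objective: faster
-- what changed: B replaces A's per-character state machine (which re-runs isidentifier on the whole growing prefix at every char) with staged bulk passes: translate every non-identifier character to a space, split() the line into maximal identifier-character runs, strip each run's leading digits, and keep the runs with no lowercase letter.
import Mathlib
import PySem

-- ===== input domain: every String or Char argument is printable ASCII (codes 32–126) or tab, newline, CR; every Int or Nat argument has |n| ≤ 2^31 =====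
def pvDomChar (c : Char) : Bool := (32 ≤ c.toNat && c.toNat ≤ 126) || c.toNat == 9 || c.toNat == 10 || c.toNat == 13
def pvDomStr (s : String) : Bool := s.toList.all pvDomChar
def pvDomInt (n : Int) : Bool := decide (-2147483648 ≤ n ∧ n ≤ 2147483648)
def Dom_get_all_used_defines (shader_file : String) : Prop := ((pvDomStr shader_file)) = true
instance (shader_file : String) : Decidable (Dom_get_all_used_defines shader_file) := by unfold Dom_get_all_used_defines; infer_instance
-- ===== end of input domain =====

-- B replaces A's per-character state machine (which rechecks the growing prefix with
-- isidentifier at every step) by staged bulk passes: translate non-identifier chars to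
-- spaces, split() into runs, strip each run's leading digits, keep uppercase-only runs.

-- str.isidentifier for a List Char; exact on the printable-ASCII (+ tab) domain,
-- where XID_Start = [A-Za-z_] and XID_Continue = [A-Za-z0-9_].
def pvIsIdentifier (s : List Char) : Bool :=
  match s with
  | [] => false
  | c :: rest =>
      (PySem.Chars.isalpha c || c == '_') &&
      rest.all (fun d => PySem.Chars.isalnum d || d == '_')

-- ===== PORT A =====
def has_no_lower_case : List Char → Bool
  | [] => true
  | c :: rest => if PySem.Chars.islower c then false else has_no_lower_case rest

-- one iteration of split_into_identifiers' loop: state = (string_so_far, identifiers)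
def pvSplitStep (st : List Char × List (List Char)) (c : Char) :
    List Char × List (List Char) :=
  let (string_so_far, identifiers) := st
  if pvIsIdentifier string_so_far then
    if pvIsIdentifier (string_so_far ++ [c]) then (string_so_far ++ [c], identifiers)
    else ([c], identifiers ++ [string_so_far])
  else ([c], identifiers)

def split_into_identifiers (line : List Char) : List (List Char) :=
  if line = [] then []
  else
    let (string_so_far, identifiers) := line.foldl pvSplitStep ([], [])
    if pvIsIdentifier string_so_far then identifiers ++ [string_so_far] else identifiers

def get_all_used_defines (shader_file : String) : List String :=
  (PySem.Str.splitlines shader_file).foldl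
    (fun used_defines line =>
      let line := (PySem.Str.lstrip line).toList
      if PySem.Chars.startswith line ['#'] || line.length == 0 then used_defines
      else
        (split_into_identifiers line).foldl
          (fun u ident =>
            if has_no_lower_case ident then PySem.Set.add u (String.ofList ident) else u)
          used_defines)
    PySem.Set.empty

-- ===== PORT B =====
-- membership in Source B's _KEEP set (exactly the ASCII alphanumerics plus '_')
def pvKeep (c : Char) : Bool := PySem.Chars.isalnum c || c == '_'

-- line.translate(_TABLE): every non-_KEEP character becomes a space
def pvTranslate (l : List Char) : List Char := l.map (fun c => if pvKeep c then c else ' ')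

def get_all_used_defines_alt (shader_file : String) : List String :=
  (PySem.Str.splitlines shader_file).foldl
    (fun used_defines raw_line =>
      let line := (PySem.Str.lstrip raw_line).toList
      match line with
      | [] => used_defines
      | c :: _ =>
          if c == '#' then used_defines
          else
            (PySem.Chars.split₀ (pvTranslate line)).foldl
              (fun u run =>
                -- run.lstrip("0123456789"): drop leading decimal digits (exact: that
                -- character set is exactly Chars.isdigit)
                let ident := run.dropWhile PySem.Chars.isdigit
                if !ident.isEmpty && ident == PySem.Chars.upper ident then
                  PySem.Set.add u (String.ofList ident)
                else u)
              used_defines)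
    PySem.Set.empty

-- ===== PRECONDITION & SPEC =====
def Spec_get_all_used_defines (shader_file : String) (out : List String) : Prop := out = get_all_used_defines_alt shader_file
instance (shader_file : String) (out : List String) : Decidable (Spec_get_all_used_defines shader_file out) := by unfold Spec_get_all_used_defines; infer_instance

-- ===== CLAIM (what is proved, stated in full; the proofs are below) =====
def Claim_equal_get_all_used_defines : Prop := ∀ (shader_file : String), Dom_get_all_used_defines shader_file → Spec_get_all_used_defines shader_file (get_all_used_defines shader_file)

-- ===== LEMMAS AND PROOFS =====

-- the filter-and-add step A performs on a finished identifier
def pvAddIf (u : PySem.Set String) (ident : List Char) : PySem.Set String :=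
  if has_no_lower_case ident then PySem.Set.add u (String.ofList ident) else u

-- B's per-run step
def pvRunAdd (u : PySem.Set String) (run : List Char) : PySem.Set String :=
  let ident := run.dropWhile PySem.Chars.isdigit
  if !ident.isEmpty && ident == PySem.Chars.upper ident then
    PySem.Set.add u (String.ofList ident)
  else u

-- maximal runs of _KEEP characters (what translate+split() computes)
def runsR : List Char → List (List Char)
  | [] => []
  | c :: rest =>
      if pvKeep c then (c :: rest.takeWhile pvKeep) :: runsR (rest.dropWhile pvKeep)
      else runsR rest
termination_by l => l.length
decreasing_by
  · simpa [Nat.lt_succ_iff] using List.length_dropWhile_le pvKeep rest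
  · simp

def extractId (run : List Char) : Option (List Char) :=
  let id := run.dropWhile PySem.Chars.isdigit
  if id.isEmpty then none else some id

def idsOf (l : List Char) : List (List Char) := (runsR l).filterMap extractId

lemma hnl_eq_not_any (l : List Char) :
    has_no_lower_case l = !(l.any PySem.Chars.islower) := by
  induction l with
  | nil => rfl
  | cons c r ih => by_cases h : PySem.Chars.islower c <;> simp [has_no_lower_case, ih, h]

lemma ident_append (s : List Char) (c : Char) (h : pvIsIdentifier s = true) :
    pvIsIdentifier (s ++ [c]) = pvKeep c := by
  match s with
  | [] => simp [pvIsIdentifier] at h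
  | d :: rest =>
      simp only [pvIsIdentifier, Bool.and_eq_true] at h
      simp only [pvIsIdentifier, List.cons_append, List.all_append, List.all_cons,
                 List.all_nil, Bool.and_true]
      rw [h.1, h.2]
      simp [pvKeep]

lemma ident_single (c : Char) :
    pvIsIdentifier [c] = (PySem.Chars.isalpha c || c == '_') := by
  simp [pvIsIdentifier]

lemma isdigit_iff (c : Char) : PySem.Chars.isdigit c = true ↔ 48 ≤ c.toNat ∧ c.toNat ≤ 57 := by
  have h0 : ('0':Char).val.toNat = 48 := rfl
  have h9 : ('9':Char).val.toNat = 57 := rfl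
  have hc : c.toNat = c.val.toNat := rfl
  simp only [PySem.Chars.isdigit, Char.le_def, UInt32.le_iff_toNat_le, h0, h9, hc,
    Bool.and_eq_true, decide_eq_true_eq]

lemma islower_iff (c : Char) : PySem.Chars.islower c = true ↔ 97 ≤ c.toNat ∧ c.toNat ≤ 122 := by
  have h0 : ('a':Char).val.toNat = 97 := rfl
  have h9 : ('z':Char).val.toNat = 122 := rfl
  have hc : c.toNat = c.val.toNat := rfl
  simp only [PySem.Chars.islower, Char.le_def, UInt32.le_iff_toNat_le, h0, h9, hc,
    Bool.and_eq_true, decide_eq_true_eq]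

lemma isupper_iff (c : Char) : PySem.Chars.isupper c = true ↔ 65 ≤ c.toNat ∧ c.toNat ≤ 90 := by
  have h0 : ('A':Char).val.toNat = 65 := rfl
  have h9 : ('Z':Char).val.toNat = 90 := rfl
  have hc : c.toNat = c.val.toNat := rfl
  simp only [PySem.Chars.isupper, Char.le_def, UInt32.le_iff_toNat_le, h0, h9, hc,
    Bool.and_eq_true, decide_eq_true_eq]

lemma keep_toNat (c : Char) (h : pvKeep c = true) :
    (48 ≤ c.toNat ∧ c.toNat ≤ 57) ∨ (65 ≤ c.toNat ∧ c.toNat ≤ 90) ∨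
    (97 ≤ c.toNat ∧ c.toNat ≤ 122) ∨ c.toNat = 95 := by
  simp only [pvKeep, PySem.Chars.isalnum, PySem.Chars.isalpha, Bool.or_eq_true_iff,
    beq_iff_eq] at h
  rcases h with ((h | h) | h) | h
  · exact Or.inr (Or.inl ((isupper_iff c).mp h))
  · exact Or.inr (Or.inr (Or.inl ((islower_iff c).mp h)))
  · exact Or.inl ((isdigit_iff c).mp h)
  · subst h; exact Or.inr (Or.inr (Or.inr rfl))

lemma start_keep (c : Char) (h : pvIsIdentifier [c] = true) :
    pvKeep c = true ∧ PySem.Chars.isdigit c = false := by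
  rw [ident_single] at h
  constructor
  · simp only [pvKeep, PySem.Chars.isalnum, Bool.or_eq_true_iff] at *
    rcases h with h | h
    · exact Or.inl (Or.inl h)
    · exact Or.inr h
  · rw [← Bool.not_eq_true, isdigit_iff]
    rcases Bool.or_eq_true_iff.mp h with h' | h'
    · simp only [PySem.Chars.isalpha, Bool.or_eq_true_iff] at h'
      rcases h' with h'' | h''
      · have := (isupper_iff c).mp h''; omega
      · have := (islower_iff c).mp h''; omega
    · have : c = '_' := by simpa using h'
      subst this; decide

lemma keep_not_start (c : Char) (hk : pvKeep c = true) (h : pvIsIdentifier [c] = false) :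
    PySem.Chars.isdigit c = true := by
  rw [ident_single] at h
  simp only [Bool.or_eq_false_iff] at h
  simp only [pvKeep, PySem.Chars.isalnum, h.1, h.2, Bool.false_or, Bool.or_false] at hk
  exact hk

lemma keep_not_space (c : Char) (h : pvKeep c = true) : PySem.Chars.isspace c = false := by
  have hr := keep_toNat c h
  cases hs : PySem.Chars.isspace c
  · rfl
  · exfalso
    simp only [PySem.Chars.isspace, Bool.or_eq_true_iff, Bool.and_eq_true,
      decide_eq_true_eq] at hs
    omega

lemma upperChar_eq_iff (c : Char) :
    (PySem.Chars.upperChar c = c) ↔ PySem.Chars.islower c = false := by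
  constructor
  · intro h
    rw [← Bool.not_eq_true]
    intro hl
    have h1 : 97 ≤ c.toNat ∧ c.toNat ≤ 122 := (islower_iff c).mp hl
    simp only [PySem.Chars.upperChar, hl, if_true] at h
    have hv : (c.toNat - 32).isValidChar := Or.inl (by omega)
    have h2 : (Char.ofNat (c.toNat - 32)).toNat = c.toNat - 32 := by
      rw [Char.toNat_ofNat, if_pos hv]
    have := congrArg Char.toNat h
    omega
  · intro h; simp [PySem.Chars.upperChar, h]

lemma extractId_digit_cons (d : Char) (l : List Char) (hd : PySem.Chars.isdigit d = true) :
    extractId (d :: l) = extractId l := by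
  unfold extractId
  rw [List.dropWhile_cons_of_pos hd]

-- digit-headed lists contribute nothing new to idsOf
lemma idsOf_digit_cons (d : Char) (l : List Char) (hd : PySem.Chars.isdigit d = true) :
    idsOf (d :: l) = idsOf l := by
  have hkd : pvKeep d = true := by simp [pvKeep, PySem.Chars.isalnum, hd]
  match l with
  | [] => simp [idsOf, runsR, hkd, extractId, hd]
  | e :: r =>
      by_cases hke : pvKeep e = true
      · have h1 : List.takeWhile pvKeep (e :: r) = e :: List.takeWhile pvKeep r := by
          simp [List.takeWhile_cons, hke]
        have h2 : List.dropWhile pvKeep (e :: r) = List.dropWhile pvKeep r := by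
          simp [List.dropWhile_cons, hke]
        unfold idsOf
        rw [runsR, if_pos hkd, runsR, if_pos hke, h1, h2,
            List.filterMap_cons, List.filterMap_cons, extractId_digit_cons _ _ hd]
      · have hke' : pvKeep e = false := by simpa using hke
        have h1 : List.takeWhile pvKeep (e :: r) = [] := by
          simp [List.takeWhile_cons, hke']
        have h2 : List.dropWhile pvKeep (e :: r) = e :: r := by
          simp [List.dropWhile_cons, hke']
        have hnil : extractId [d] = none := by
          simp [extractId, List.dropWhile, hd]
        unfold idsOf
        rw [runsR, if_pos hkd, h1, h2, List.filterMap_cons, hnil]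

lemma idsOf_junk_cons (c : Char) (l : List Char) (hc : pvKeep c = false) :
    idsOf (c :: l) = idsOf l := by
  simp [idsOf, runsR, hc]

lemma idsOf_start_cons (c : Char) (l : List Char) (hc : pvIsIdentifier [c] = true) :
    idsOf (c :: l) = (c :: l.takeWhile pvKeep) :: idsOf (l.dropWhile pvKeep) := by
  obtain ⟨hk, hd⟩ := start_keep c hc
  simp [idsOf, runsR, hk, extractId, List.dropWhile, hd]

-- ===== A-side characterization: the state machine computes idsOf =====

def finishA (p : List Char × List (List Char)) : List (List Char) :=
  if pvIsIdentifier p.1 then p.2 ++ [p.1] else p.2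

lemma machineP (n : Nat) : ∀ l : List Char, l.length ≤ n →
    (∀ sofar ids, pvIsIdentifier sofar = false →
        finishA (l.foldl pvSplitStep (sofar, ids)) = ids ++ idsOf l) ∧
    (∀ sofar ids, pvIsIdentifier sofar = true →
        finishA (l.foldl pvSplitStep (sofar, ids)) =
          ids ++ (sofar ++ l.takeWhile pvKeep) :: idsOf (l.dropWhile pvKeep)) := by
  induction n with
  | zero =>
      intro l hl
      have : l = [] := List.length_eq_zero_iff.mp (Nat.le_zero.mp hl)
      subst this
      constructor
      · intro sofar ids h; simp [finishA, h, idsOf, runsR]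
      · intro sofar ids h; simp [finishA, h, idsOf, runsR]
  | succ n ih =>
      intro l hl
      match l with
      | [] =>
          constructor
          · intro sofar ids h; simp [finishA, h, idsOf, runsR]
          · intro sofar ids h; simp [finishA, h, idsOf, runsR]
      | c :: rest =>
          have hr : rest.length ≤ n := by simpa using hl
          constructor
          · -- fresh state
            intro sofar ids h
            have hstep : pvSplitStep (sofar, ids) c = ([c], ids) := by
              simp [pvSplitStep, h]
            rw [List.foldl_cons, hstep]
            by_cases hc : pvIsIdentifier [c] = true
            · rw [(ih rest hr).2 [c] ids hc, idsOf_start_cons c rest hc]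
              simp
            · have hc' : pvIsIdentifier [c] = false := by simpa using hc
              rw [(ih rest hr).1 [c] ids hc']
              by_cases hk : pvKeep c = true
              · rw [idsOf_digit_cons c rest (keep_not_start c hk hc')]
              · rw [idsOf_junk_cons c rest (by simpa using hk)]
          · -- inside a token
            intro sofar ids h
            by_cases hk : pvKeep c = true
            · have hext : pvIsIdentifier (sofar ++ [c]) = true := by
                rw [ident_append sofar c h]; exact hk
              have hstep : pvSplitStep (sofar, ids) c = (sofar ++ [c], ids) := by
                simp [pvSplitStep, h, hext]
              rw [List.foldl_cons, hstep, (ih rest hr).2 (sofar ++ [c]) ids hext]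
              simp [List.takeWhile_cons, List.dropWhile_cons, hk]
            · have hk' : pvKeep c = false := by simpa using hk
              have hext : pvIsIdentifier (sofar ++ [c]) = false := by
                rw [ident_append sofar c h]; exact hk'
              have hstep : pvSplitStep (sofar, ids) c = ([c], ids ++ [sofar]) := by
                simp [pvSplitStep, h, hext]
              have hc' : pvIsIdentifier [c] = false := by
                rw [ident_single]
                simp only [pvKeep, PySem.Chars.isalnum, Bool.or_eq_true_iff] at hk'
                simp only [Bool.or_eq_false_iff] at hk' ⊢
                exact ⟨hk'.1.1, hk'.2⟩
              rw [List.foldl_cons, hstep, (ih rest hr).1 [c] (ids ++ [sofar]) hc']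
              have ht : List.takeWhile pvKeep (c :: rest) = [] := by
                simp [List.takeWhile_cons, hk']
              have hdw : List.dropWhile pvKeep (c :: rest) = c :: rest := by
                simp [List.dropWhile_cons, hk']
              rw [ht, hdw, idsOf_junk_cons c rest hk']
              simp

lemma split_eq_idsOf (l : List Char) : split_into_identifiers l = idsOf l := by
  match l with
  | [] => simp [split_into_identifiers, idsOf, runsR]
  | c :: rest =>
      have h := (machineP (c :: rest).length (c :: rest) le_rfl).1 [] []
        (by simp [pvIsIdentifier])
      simp only [finishA] at h
      unfold split_into_identifiers
      simp only [List.cons_ne_self, if_false, reduceCtorEq]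
      rcases hfold : (c :: rest).foldl pvSplitStep ([], []) with ⟨s, ids⟩
      rw [hfold] at h
      simpa using h

-- ===== B-side characterization: translate + split() computes runsR =====

lemma go_runs (n : Nat) : ∀ l : List Char, l.length ≤ n →
    (∀ acc, PySem.Chars.split₀.go (pvTranslate l) [] acc = acc.reverse ++ runsR l) ∧
    (∀ cur acc, cur ≠ [] →
        PySem.Chars.split₀.go (pvTranslate l) cur acc =
          acc.reverse ++ (cur.reverse ++ l.takeWhile pvKeep) :: runsR (l.dropWhile pvKeep)) := by
  induction n with
  | zero =>
      intro l hl
      have : l = [] := List.length_eq_zero_iff.mp (Nat.le_zero.mp hl)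
      subst this
      constructor
      · intro acc; simp [pvTranslate, PySem.Chars.split₀.go, runsR]
      · intro cur acc hcur
        simp [pvTranslate, PySem.Chars.split₀.go, List.isEmpty_eq_false_iff.mpr hcur, runsR]
  | succ n ih =>
      intro l hl
      match l with
      | [] =>
          constructor
          · intro acc; simp [pvTranslate, PySem.Chars.split₀.go, runsR]
          · intro cur acc hcur
            simp [pvTranslate, PySem.Chars.split₀.go, List.isEmpty_eq_false_iff.mpr hcur, runsR]
      | c :: rest =>
          have hr : rest.length ≤ n := by simpa using hl
          have htr : pvTranslate (c :: rest)
              = (if pvKeep c then c else ' ') :: pvTranslate rest := by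
            simp [pvTranslate]
          constructor
          · intro acc
            by_cases hk : pvKeep c = true
            · rw [htr, if_pos hk]
              rw [show PySem.Chars.split₀.go (c :: pvTranslate rest) [] acc
                    = PySem.Chars.split₀.go (pvTranslate rest) [c] acc from by
                simp [PySem.Chars.split₀.go, keep_not_space c hk]]
              rw [(ih rest hr).2 [c] acc (by simp)]
              simp [runsR, hk]
            · have hk' : pvKeep c = false := by simpa using hk
              rw [htr, if_neg (by simp [hk'])]
              have hsp : PySem.Chars.isspace ' ' = true := by decide
              rw [show PySem.Chars.split₀.go (' ' :: pvTranslate rest) [] acc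
                    = PySem.Chars.split₀.go (pvTranslate rest) [] acc from by
                simp [PySem.Chars.split₀.go, hsp]]
              rw [(ih rest hr).1 acc]
              simp [runsR, hk']
          · intro cur acc hcur
            by_cases hk : pvKeep c = true
            · rw [htr, if_pos hk]
              rw [show PySem.Chars.split₀.go (c :: pvTranslate rest) cur acc
                    = PySem.Chars.split₀.go (pvTranslate rest) (c :: cur) acc from by
                simp [PySem.Chars.split₀.go, keep_not_space c hk]]
              rw [(ih rest hr).2 (c :: cur) acc (by simp)]
              simp [List.takeWhile_cons, List.dropWhile_cons, hk]
            · have hk' : pvKeep c = false := by simpa using hk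
              rw [htr, if_neg (by simp [hk'])]
              have hsp : PySem.Chars.isspace ' ' = true := by decide
              rw [show PySem.Chars.split₀.go (' ' :: pvTranslate rest) cur acc
                    = PySem.Chars.split₀.go (pvTranslate rest) [] (cur.reverse :: acc) from by
                simp [PySem.Chars.split₀.go, hsp, List.isEmpty_eq_false_iff.mpr hcur]]
              rw [(ih rest hr).1 (cur.reverse :: acc)]
              simp [List.takeWhile_cons, List.dropWhile_cons, hk', runsR]

lemma split₀_translate (l : List Char) :
    PySem.Chars.split₀ (pvTranslate l) = runsR l := by
  have h := (go_runs l.length l le_rfl).1 []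
  simpa [PySem.Chars.split₀] using h

-- ===== the two per-run filters agree =====

lemma map_self_iff (l : List Char) (f : Char → Char) :
    l.map f = l ↔ ∀ x ∈ l, f x = x := by
  induction l with
  | nil => simp
  | cons a t ih => simp [List.map_cons, List.cons.injEq, ih, and_comm]

lemma upper_filter (id : List Char) :
    (id == PySem.Chars.upper id) = has_no_lower_case id := by
  rw [hnl_eq_not_any]
  by_cases h : id = PySem.Chars.upper id
  · have : ∀ c ∈ id, PySem.Chars.islower c = false := by
      intro c hc
      have := (map_self_iff id PySem.Chars.upperChar).mp
        (by rw [← PySem.Chars.upper]; exact h.symm) c hc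
      exact (upperChar_eq_iff c).mp this
    rw [show (id == PySem.Chars.upper id) = true from by simpa using h]
    symm; simp only [Bool.not_eq_true', List.any_eq_false]
    simpa using this
  · have hne : (id == PySem.Chars.upper id) = false := by simpa using h
    rw [hne]
    symm
    simp only [Bool.not_eq_false', List.any_eq_true]
    by_contra hno
    push_neg at hno
    apply h
    symm
    apply (map_self_iff _ _).mpr
    intro c hc
    apply (upperChar_eq_iff c).mpr
    cases hl : PySem.Chars.islower c
    · rfl
    · exact absurd hl (hno c hc)

lemma runAdd_eq (u : PySem.Set String) (run : List Char) :
    pvRunAdd u run = match extractId run with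
      | some id => pvAddIf u id
      | none => u := by
  unfold pvRunAdd extractId
  by_cases he : (run.dropWhile PySem.Chars.isdigit).isEmpty = true
  · simp [he]
  · have he' : (run.dropWhile PySem.Chars.isdigit).isEmpty = false := by simpa using he
    simp only [he', if_false, Bool.not_false, Bool.true_and, Bool.false_eq_true]
    rw [upper_filter]
    unfold pvAddIf
    rfl

-- per-line correspondence
lemma per_line (line : List Char) (used : PySem.Set String) :
    (if PySem.Chars.startswith line ['#'] || line.length == 0 then used
     else (split_into_identifiers line).foldl pvAddIf used) =
    (match line with
     | [] => used
     | c :: _ =>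
         if c == '#' then used
         else (PySem.Chars.split₀ (pvTranslate line)).foldl pvRunAdd used) := by
  match line with
  | [] => simp [PySem.Chars.startswith]
  | c :: rest =>
      by_cases hc : c = '#'
      · simp [hc, PySem.Chars.startswith]
      · have hsw : PySem.Chars.startswith (c :: rest) ['#'] = false := by
          simp [PySem.Chars.startswith, List.isPrefixOf]
          exact fun h => hc h.symm
        simp only [hsw, Bool.false_or]
        have hlen : ((c :: rest).length == 0) = false := by simp
        rw [hlen]
        simp only [if_false, Bool.false_eq_true]
        rw [show (c == '#') = false by simp [hc]]
        simp only [if_false, Bool.false_eq_true]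
        rw [split₀_translate, split_eq_idsOf, idsOf, List.foldl_filterMap]
        apply PySem.List.foldl_congr_mem
        intro acc run _
        rw [runAdd_eq]
        rcases extractId run with _ | b <;> rfl

lemma outer_loop (lines : List String) :
    ∀ (used : PySem.Set String),
      lines.foldl
        (fun used_defines line =>
          let line := (PySem.Str.lstrip line).toList
          if PySem.Chars.startswith line ['#'] || line.length == 0 then used_defines
          else
            (split_into_identifiers line).foldl
              (fun u ident =>
                if has_no_lower_case ident then PySem.Set.add u (String.ofList ident) else u)
              used_defines) used =
      lines.foldl
        (fun used_defines raw_line =>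
          let line := (PySem.Str.lstrip raw_line).toList
          match line with
          | [] => used_defines
          | c :: _ =>
              if c == '#' then used_defines
              else
                (PySem.Chars.split₀ (pvTranslate line)).foldl
                  (fun u run =>
                    let ident := run.dropWhile PySem.Chars.isdigit
                    if !ident.isEmpty && ident == PySem.Chars.upper ident then
                      PySem.Set.add u (String.ofList ident)
                    else u)
                  used_defines) used := by
  induction lines with
  | nil => intro used; rfl
  | cons l rest ih =>
      intro used
      simp only [List.foldl_cons]
      rw [show (fun u ident =>
            if has_no_lower_case ident then PySem.Set.add u (String.ofList ident) else u) =
          pvAddIf from rfl]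
      rw [show (fun u (run : List Char) =>
            let ident := run.dropWhile PySem.Chars.isdigit
            if !ident.isEmpty && ident == PySem.Chars.upper ident then
              PySem.Set.add u (String.ofList ident)
            else u) = pvRunAdd from rfl]
      rw [per_line]
      exact ih _

-- ===== VERDICT (by name: the statement is the Claim_ definition above) =====
theorem get_all_used_defines_spec : Claim_equal_get_all_used_defines := by
  intro shader_file _
  unfold Spec_get_all_used_defines get_all_used_defines get_all_used_defines_alt
  exact outer_loop _ _
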